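-- pv_equiv track=rewrite | github.com/Bitsy-Chuck/maker_with_rlm | src/maker/yaml_cleaner/fixes.py | fix_tabs
-- ===== SOURCE A (Python) =====
-- def fix_tabs(raw: str) -> str:
--     """Replace leading tabs with 2 spaces."""
--     lines = raw.split("\n")
--     fixed = []
--     for line in lines:
--         # Count leading tabs and replace with 2 spaces each
--         stripped = line.lstrip("\t")
--         tab_count = len(line) - len(stripped)
--         fixed.append("  " * tab_count + stripped)
--     return "\n".join(fixed)
-- ===== SOURCE B (Python) =====
-- def fix_tabs(raw: str) -> str:
--     """Replace leading tabs with 2 spaces (single left-to-right pass)."""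
--     out = []
--     at_start = True
--     for c in raw:
--         if at_start and c == '\t':
--             out.append('  ')
--         else:
--             out.append(c)
--             at_start = (c == '\n')
--     return ''.join(out)
-- ===== Notes on version B (the rewrite author's own statement) =====
-- stated objective: alternative
-- what changed: Replaces the split-into-lines / count-leading-tabs / rejoin pipeline with a single left-to-right scan that carries an at-line-start flag and expands tabs seen while the flag holds.
import Mathlib
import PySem

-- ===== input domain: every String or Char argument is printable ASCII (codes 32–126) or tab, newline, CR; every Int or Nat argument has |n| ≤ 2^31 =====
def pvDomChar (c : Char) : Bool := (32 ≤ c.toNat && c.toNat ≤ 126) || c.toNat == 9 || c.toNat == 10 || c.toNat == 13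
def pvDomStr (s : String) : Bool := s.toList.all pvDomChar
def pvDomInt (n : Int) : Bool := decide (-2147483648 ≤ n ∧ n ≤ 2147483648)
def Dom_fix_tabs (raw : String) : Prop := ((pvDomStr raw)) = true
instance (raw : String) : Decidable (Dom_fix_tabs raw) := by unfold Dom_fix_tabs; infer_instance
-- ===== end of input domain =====

-- B replaces A's split/count/rejoin pipeline by one left-to-right scan with an at-line-start flag; objective: alternative (same cost, no line list).

-- ===== PORT A =====
-- literal port of A: split on "\n", per line lstrip("\t") (ported by hand as dropWhile over the
-- char set {'\t'} — exact for lstrip with an explicit chars argument), "  " * tab_count, rejoin.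
def fix_tabs (raw : String) : String :=
  let lines := PySem.Chars.splitOn raw.toList ['\n']
  let fixed := lines.foldl (fun acc line =>
      let stripped := line.dropWhile (fun c => c ∈ ['\t'])
      let tab_count := line.length - stripped.length
      acc ++ [(List.replicate tab_count [' ', ' ']).flatten ++ stripped]) []
  String.ofList (PySem.Chars.join ['\n'] fixed)

-- ===== PORT B =====
def fixGoB (atStart : Bool) : List Char → List Char
  | [] => []
  | c :: cs =>
    if atStart && (c == '\t') then ' ' :: ' ' :: fixGoB true cs
    else c :: fixGoB (c == '\n') cs

def fix_tabs_alt (raw : String) : String := String.ofList (fixGoB true raw.toList)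

-- ===== PRECONDITION & SPEC =====
def Spec_fix_tabs (raw : String) (out : String) : Prop := out = fix_tabs_alt raw
instance (raw : String) (out : String) : Decidable (Spec_fix_tabs raw out) := by unfold Spec_fix_tabs; infer_instance

-- ===== CLAIM (what is proved, stated in full; the proofs are below) =====
def Claim_equal_fix_tabs : Prop := ∀ (raw : String), Dom_fix_tabs raw → Spec_fix_tabs raw (fix_tabs raw)

-- ===== LEMMAS AND PROOFS =====

-- head/tail of the split of l on '\n' (splitOn always yields at least one piece)
def splitNL : List Char → List Char × List (List Char)
  | [] => ([], [])
  | c :: cs =>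
    let p := splitNL cs
    if c = '\n' then ([], p.1 :: p.2) else (c :: p.1, p.2)

-- A's per-line transformation
def fixLine (line : List Char) : List Char :=
  let stripped := line.dropWhile (fun c => c ∈ ['\t'])
  (List.replicate (line.length - stripped.length) [' ', ' ']).flatten ++ stripped

-- tail part of intercalating '\n'
def joinTail : List (List Char) → List Char
  | [] => []
  | x :: xs => '\n' :: (x ++ joinTail xs)

lemma splitOn_go_eq (fuel : Nat) (l cur : List Char) (acc : List (List Char))
    (h : l.length < fuel) :
    PySem.Chars.splitOn.go ['\n'] fuel l cur acc =
      acc.reverse ++ ((cur.reverse ++ (splitNL l).1) :: (splitNL l).2) := by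
  induction fuel generalizing l cur acc with
  | zero => omega
  | succ fuel ih =>
    cases l with
    | nil => simp [PySem.Chars.splitOn.go, splitNL]
    | cons c rest =>
      by_cases hc : c = '\n'
      · subst hc
        rw [PySem.Chars.splitOn.go]
        simp only [List.isPrefixOf]
        simp only [beq_self_eq_true, Bool.true_and, if_true]
        rw [ih _ _ _ (by simpa using Nat.lt_of_succ_lt_succ h)]
        simp [splitNL]
      · rw [PySem.Chars.splitOn.go]
        simp only [List.isPrefixOf]
        rw [if_neg (by simp [Ne.symm hc])]
        rw [ih _ _ _ (by simpa using Nat.lt_of_succ_lt_succ h)]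
        simp [splitNL, hc, List.append_assoc]

lemma splitOn_eq_splitNL (l : List Char) :
    PySem.Chars.splitOn l ['\n'] = (splitNL l).1 :: (splitNL l).2 := by
  unfold PySem.Chars.splitOn
  rw [splitOn_go_eq (l.length + 1) l [] [] (by omega)]
  simp

lemma join_eq_joinTail (x : List Char) (xs : List (List Char)) :
    PySem.Chars.join ['\n'] (x :: xs) = x ++ joinTail xs := by
  induction xs generalizing x with
  | nil => simp [PySem.Chars.join, List.intercalate, joinTail]
  | cons y ys ih =>
    have h := ih y
    simp only [PySem.Chars.join, List.intercalate, List.intersperse] at h ⊢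
    cases ys <;> simp_all [joinTail]

lemma fixLine_nil : fixLine [] = [] := by simp [fixLine]

lemma fixLine_tab (h : List Char) : fixLine ('\t' :: h) = ' ' :: ' ' :: fixLine h := by
  have hle : (h.dropWhile (fun c => c ∈ ['\t'])).length ≤ h.length :=
    List.length_dropWhile_le _ _
  simp [fixLine, List.dropWhile]
  rw [show h.length + 1 - (List.dropWhile (fun c => decide (c = '\t')) h).length
      = (h.length - (List.dropWhile (fun c => decide (c = '\t')) h).length) + 1 by
    simp only [List.mem_singleton] at hle; omega]
  simp [List.replicate_succ]

lemma fixLine_not_tab (c : Char) (h : List Char) (hc : c ≠ '\t') :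
    fixLine (c :: h) = c :: h := by
  simp [fixLine, List.dropWhile, hc]

-- simultaneous characterisation of B's scan: flag true = A restarted at a line start,
-- flag false = mid-line (head piece copied verbatim)
lemma fixGoB_eq (l : List Char) :
    fixGoB true l = fixLine (splitNL l).1 ++ joinTail (((splitNL l).2).map fixLine) ∧
    fixGoB false l = (splitNL l).1 ++ joinTail (((splitNL l).2).map fixLine) := by
  induction l with
  | nil => refine ⟨?_, ?_⟩ <;> simp [fixGoB, splitNL, fixLine, joinTail]
  | cons c cs ih =>
    obtain ⟨iht, ihf⟩ := ih
    by_cases hn : c = '\n'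
    · subst hn
      constructor <;> simp [fixGoB, splitNL, joinTail, iht, fixLine_nil]
    · by_cases ht : c = '\t'
      · subst ht
        refine ⟨?_, ?_⟩
        · simp [fixGoB, splitNL, iht, fixLine_tab]
        · simp [fixGoB, splitNL, ihf]
      · have hb : (c == '\n') = false := by simp [hn]
        refine ⟨?_, ?_⟩
        · simp [fixGoB, splitNL, hn, ht, hb, ihf, fixLine_not_tab c _ ht]
        · simp [fixGoB, splitNL, hn, hb, ihf]

lemma foldl_fixLine (lines : List (List Char)) :
    lines.foldl (fun acc line =>
      let stripped := line.dropWhile (fun c => c ∈ ['\t'])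
      let tab_count := line.length - stripped.length
      acc ++ [(List.replicate tab_count [' ', ' ']).flatten ++ stripped]) [] =
    lines.map fixLine := by
  simpa [fixLine] using
    PySem.List.foldl_append_singleton_eq_map fixLine lines []

-- ===== VERDICT (by name: the statement is the Claim_ definition above) =====
theorem fix_tabs_spec : Claim_equal_fix_tabs := by
  intro raw _
  unfold Spec_fix_tabs fix_tabs fix_tabs_alt
  simp only []
  rw [splitOn_eq_splitNL, foldl_fixLine]
  simp only [List.map_cons]
  rw [join_eq_joinTail, (fixGoB_eq raw.toList).1]
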